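-- pv_equiv track=rewrite | github.com/HelloWorld017/nenwfont | nenwfont/nodes/subset.py | build_unicode_range
-- ===== SOURCE A (Python) =====
-- def build_unicode_range(chars):
--     ranges = []
--     range_start = ord(chars[0])
--     range_end = range_start
--
--     for index in range(1, len(chars) + 1):
--         code_point = ord(chars[index]) if index < len(chars) else -1
--
--         if code_point != range_end + 1:
--             if range_start == range_end:
--                 ranges.append('U+%X' % range_start)
--
--             else:
--                 ranges.append('U+%X-%X' % (range_start, range_end))
--
--             range_start = code_point
--             range_end = code_point
--         else:
--             range_end += 1
--
--     return ','.join(ranges)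
-- ===== SOURCE B (Python) =====
-- def build_unicode_range(chars):
--     cps = [ord(c) for c in chars]
--     n = len(cps)
--     cuts = [0] + [k for k in range(1, n) if cps[k] != cps[k - 1] + 1] + [n]
--     labels = []
--     for s, e in zip(cuts, cuts[1:]):
--         lo, hi = cps[s], cps[e - 1]
--         labels.append('U+%X' % lo if lo == hi else 'U+%X-%X' % (lo, hi))
--     return ','.join(labels)
-- ===== Notes on version B (the rewrite author's own statement) =====
-- stated objective: alternative
-- what changed: B is staged: it first computes the list of cut positions (indices where consecutivity breaks) by a comprehension, then formats each (start,end) slice pair from zip(cuts, cuts[1:]) by indexing, instead of A's single stateful loop threading (ranges, range_start, range_end) with a -1 sentinel and flush-on-break.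
import Mathlib
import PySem

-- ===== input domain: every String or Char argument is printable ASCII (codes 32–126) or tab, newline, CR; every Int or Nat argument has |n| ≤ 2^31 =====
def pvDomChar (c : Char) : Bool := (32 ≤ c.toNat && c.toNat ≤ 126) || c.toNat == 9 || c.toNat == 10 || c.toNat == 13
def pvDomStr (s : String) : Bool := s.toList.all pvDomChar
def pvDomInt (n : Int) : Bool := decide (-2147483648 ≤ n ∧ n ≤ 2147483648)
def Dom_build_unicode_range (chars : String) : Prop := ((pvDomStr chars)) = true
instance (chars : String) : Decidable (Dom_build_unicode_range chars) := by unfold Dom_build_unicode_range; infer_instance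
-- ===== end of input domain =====

-- B stages the computation (cut positions first, then format the slices between
-- consecutive cuts) instead of A's stateful flush-on-break loop; return values
-- agree on every non-empty string (both raise IndexError on "").

-- shared formatting helpers ('%X' of a nonnegative int; exact for 0 ≤ n)
def hexDigit (d : Nat) : Char := if d < 10 then Char.ofNat (48 + d) else Char.ofNat (55 + d)

def hexRev : Nat → List Char
  | 0 => []
  | n + 1 => hexDigit ((n + 1) % 16) :: hexRev ((n + 1) / 16)
decreasing_by exact Nat.div_lt_self (Nat.succ_pos n) (by omega)

-- '%X' % n for 0 ≤ n (the only values formatted on Dom)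
def hexU (n : Int) : String := if n = 0 then "0" else String.ofList (hexRev n.toNat).reverse

-- 'U+%X' % s  /  'U+%X-%X' % (s, e)  (both Pythons format a run this way)
def fmtR (s e : Int) : String :=
  if s = e then "U+" ++ hexU s else "U+" ++ hexU s ++ "-" ++ hexU e

-- ===== PORT A =====
-- one step of A's for-loop body on the state (ranges, range_start, range_end)
def aStep (st : List String × Int × Int) (cp : Int) : List String × Int × Int :=
  let (ranges, rs, re) := st
  if cp ≠ re + 1 then (ranges ++ [fmtR rs re], cp, cp)
  else (ranges, rs, re + 1)

def build_unicode_range (chars : String) : String :=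
  -- ord(chars[index]) for indices 1..len-1, then the -1 sentinel (index = len)
  match chars.toList.map (fun c => (c.toNat : Int)) with
  | [] => ""  -- unreachable under Pre_ (A raises IndexError on chars[0])
  | c0 :: rest =>
    let st := (rest ++ [-1]).foldl aStep ([], c0, c0)
    PySem.Str.join "," st.1

-- ===== PORT B =====
def build_unicode_range_alt (chars : String) : String :=
  let cps := chars.toList.map (fun c => (c.toNat : Int))
  let n : Int := cps.length
  -- cuts = [0] + [k for k in range(1, n) if cps[k] != cps[k-1] + 1] + [n]
  let cuts : List Int := 0 :: (PySem.List.pyRange 1 n 1).filter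
      (fun k => PySem.List.pyGetD cps k 0 ≠ PySem.List.pyGetD cps (k - 1) 0 + 1) ++ [n]
  -- for s, e in zip(cuts, cuts[1:]): append the label of the slice cps[s:e]
  -- (cps[s] / cps[e-1] via pyGetD: the indices are always in range under Pre_)
  let labels := (cuts.zip cuts.tail).map (fun se =>
      fmtR (PySem.List.pyGetD cps se.1 0) (PySem.List.pyGetD cps (se.2 - 1) 0))
  PySem.Str.join "," labels

-- ===== PRECONDITION & SPEC =====
-- Pre_ excludes only the empty string, on which both A and B raise IndexError.
def Pre_build_unicode_range (chars : String) : Prop := chars ≠ ""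
instance (chars : String) : Decidable (Pre_build_unicode_range chars) := by
  unfold Pre_build_unicode_range; infer_instance
def pvWitness_build_unicode_range : String := "abc"

def Spec_build_unicode_range (chars : String) (out : String) : Prop := out = build_unicode_range_alt chars
instance (chars : String) (out : String) : Decidable (Spec_build_unicode_range chars out) := by unfold Spec_build_unicode_range; infer_instance

-- ===== CLAIM (what is proved, stated in full; the proofs are below) =====
def Claim_equal_build_unicode_range : Prop := ∀ (chars : String), Dom_build_unicode_range chars → Pre_build_unicode_range chars → Spec_build_unicode_range chars (build_unicode_range chars)

-- ===== LEMMAS AND PROOFS =====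

-- the common description both ports are reduced to: maximal-run labels
def bTake (prev : Int) : List Int → Int × List Int
  | [] => (prev, [])
  | y :: ys => if y = prev + 1 then bTake y ys else (prev, y :: ys)

theorem bTake_snd_le (p : Int) (xs : List Int) : (bTake p xs).2.length ≤ xs.length := by
  induction xs generalizing p with
  | nil => simp [bTake]
  | cons y ys ih =>
    simp only [bTake]
    split
    · exact le_trans (ih y) (by simp)
    · simp

def bRuns : List Int → List String
  | [] => []
  | x :: xs =>
    fmtR x (bTake x xs).1 :: bRuns (bTake x xs).2
termination_by xs => xs.length
decreasing_by exact Nat.lt_succ_of_le (bTake_snd_le x xs)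

theorem bRuns_nil : bRuns [] = [] := by rw [bRuns]

theorem bRuns_cons (x : Int) (xs : List Int) :
    bRuns (x :: xs) = fmtR x (bTake x xs).1 :: bRuns (bTake x xs).2 := by rw [bRuns]

-- characterisation of bTake: it takes the longest consecutive prefix
theorem bTake_spec (p : Int) (xs : List Int) :
    ∃ m, m ≤ xs.length ∧ bTake p xs = (p + m, xs.drop m) ∧
      (∀ i < m, xs.getD i 0 = p + i + 1) ∧ (m = xs.length ∨ xs.getD m 0 ≠ p + m + 1) := by
  induction xs generalizing p with
  | nil => exact ⟨0, by simp [bTake]⟩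
  | cons y ys ih =>
    by_cases h : y = p + 1
    · subst h
      obtain ⟨m, hm, ht, hrun, hend⟩ := ih (p + 1)
      refine ⟨m + 1, by simpa using hm, ?_, ?_, ?_⟩
      · have : bTake p ((p + 1) :: ys) = bTake (p + 1) ys := by simp [bTake]
        rw [this, ht, List.drop_succ_cons, Prod.mk.injEq]
        exact ⟨by push_cast; ring, rfl⟩
      · intro i hi
        cases i with
        | zero => simp
        | succ j =>
          have hj := hrun j (by omega)
          rw [List.getD_cons_succ, hj]; push_cast; ring
      · rcases hend with he | he
        · left; simp [he]
        · right
          rw [List.getD_cons_succ]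
          intro hc; apply he
          push_cast at hc ⊢; omega
    · exact ⟨0, by simp, by simp [bTake, if_neg h], by omega,
        Or.inr (by simpa using fun hc => h (by omega))⟩

-- ------- Nat-indexed reformulation of B -------

def breaksN (cps : List Int) : List Nat :=
  (List.range (cps.length - 1)).filter (fun k => decide (cps.getD (k + 1) 0 ≠ cps.getD k 0 + 1))

def cutsN (cps : List Int) : List Nat := 0 :: (breaksN cps).map (· + 1) ++ [cps.length]

def labelsN (cps : List Int) : List String :=
  ((cutsN cps).zip (cutsN cps).tail).map (fun se =>
    fmtR (cps.getD se.1 0) (cps.getD (se.2 - 1) 0))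

-- getD through drop
theorem getD_drop (l : List Int) (a k : Nat) (d : Int) :
    (l.drop a).getD k d = l.getD (a + k) d := by
  simp [List.getD_eq_getElem?_getD, List.getElem?_drop]

-- B's port equals the Nat-indexed form
-- every element of (cutsN l).tail is ≥ 1, or l = []
theorem cutsN_tail_pos (l : List Int) (e : Nat) (he : e ∈ (cutsN l).tail) (hl : l ≠ []) :
    1 ≤ e := by
  simp only [cutsN, List.cons_append, List.tail_cons, List.mem_append, List.mem_map,
    List.mem_singleton] at he
  rcases he with ⟨k, _, rfl⟩ | rfl
  · omega
  · have : l.length ≠ 0 := fun h => hl (List.length_eq_zero_iff.mp h)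
    omega

theorem alt_eq_labelsN (chars : String) :
    build_unicode_range_alt chars
      = PySem.Str.join "," (labelsN (chars.toList.map (fun c => (c.toNat : Int)))) := by
  unfold build_unicode_range_alt labelsN
  dsimp only
  generalize chars.toList.map (fun c => (c.toNat : Int)) = cps
  congr 1
  -- the Int cut list is the Nat cut list, cast
  have hcuts : (0 :: (PySem.List.pyRange 1 (cps.length : Int) 1).filter
      (fun k => PySem.List.pyGetD cps k 0 ≠ PySem.List.pyGetD cps (k - 1) 0 + 1) ++ [(cps.length : Int)])
      = (cutsN cps).map (fun k : Nat => (k : Int)) := by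
    have h1 : PySem.List.pyRange 1 (cps.length : Int) 1
        = (List.range (cps.length - 1)).map (fun k => ((k + 1 : Nat) : Int)) := by
      rw [PySem.List.pyRange_one]
      have : ((cps.length : Int) - 1).toNat = cps.length - 1 := by omega
      rw [this]
      exact List.map_congr_left (fun k _ => by push_cast; ring)
    rw [h1, List.filter_map]
    have h2 : ∀ k ∈ List.range (cps.length - 1),
        ((fun (k : Int) => decide (PySem.List.pyGetD cps k 0 ≠ PySem.List.pyGetD cps (k - 1) 0 + 1))
            ∘ (fun k : Nat => ((k + 1 : Nat) : Int))) k
          = decide (cps.getD (k + 1) 0 ≠ cps.getD k 0 + 1) := by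
      intro k _
      have ha : PySem.List.pyGetD cps ((k + 1 : Nat) : Int) 0 = cps.getD (k + 1) 0 :=
        PySem.List.pyGetD_natCast cps (k + 1) 0
      have hb : ((k + 1 : Nat) : Int) - 1 = ((k : Nat) : Int) := by push_cast; ring
      simp only [Function.comp_apply]
      rw [ha, hb, PySem.List.pyGetD_natCast]
    rw [List.filter_congr h2]
    simp only [cutsN, breaksN, List.cons_append, List.map_append, List.map_cons, List.map_map,
      Nat.cast_zero]
    rfl
  rw [hcuts]
  -- push the cast through tail, zip and map; then identify the labels pointwise
  rw [← List.map_tail, List.zip_map, List.map_map]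
  apply List.map_congr_left
  rintro ⟨s, e⟩ hmem
  have he2 : e ∈ (cutsN cps).tail := (List.of_mem_zip hmem).2
  simp only [Function.comp, Prod.map]
  by_cases hcps : cps = []
  · subst hcps
    simp only [cutsN, breaksN] at he2
    simp at he2
    subst he2
    simp [PySem.List.pyGetD, PySem.List.pyGet?, PySem.List.pyIdx?]
  · have he1 : 1 ≤ e := cutsN_tail_pos cps e he2 hcps
    have : ((e : Int)) - 1 = ((e - 1 : Nat) : Int) := by omega
    rw [this]
    simp [PySem.List.pyGetD_natCast]

-- breaks of a list starting with a maximal run of length m+1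
theorem breaksN_decomp (c0 : Int) (xs : List Int) (m : Nat)
    (hm : m ≤ xs.length)
    (hrun : ∀ i < m, xs.getD i 0 = c0 + i + 1)
    (hend : m = xs.length ∨ xs.getD m 0 ≠ c0 + m + 1) :
    breaksN (c0 :: xs) = if m = xs.length then [] else m :: (breaksN (xs.drop m)).map (· + (m + 1)) := by
  have hhead : ∀ k ≤ m, (c0 :: xs).getD k 0 = c0 + k := by
    intro k hk
    cases k with
    | zero => simp
    | succ j => rw [List.getD_cons_succ, hrun j (by omega)]; push_cast; ring
  obtain ⟨L, hL⟩ : ∃ L, xs.length = m + L := ⟨xs.length - m, by omega⟩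
  have hrange : List.range ((c0 :: xs).length - 1)
      = List.range m ++ (List.range L).map (fun j => m + j) := by
    simp only [List.length_cons, Nat.add_sub_cancel, hL]
    exact List.range_add
  unfold breaksN
  rw [hrange, List.filter_append]
  have h1 : (List.range m).filter
      (fun k => decide ((c0 :: xs).getD (k + 1) 0 ≠ (c0 :: xs).getD k 0 + 1)) = [] := by
    rw [List.filter_eq_nil_iff]
    intro k hk
    have hkm : k < m := List.mem_range.mp hk
    simp only [decide_eq_true_eq, not_not]
    rw [hhead k (by omega), hhead (k + 1) (by omega)]
    push_cast; ring
  rw [h1, List.nil_append]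
  cases L with
  | zero => simp [hL, List.range_zero]
  | succ L' =>
    have hmne : ¬ m = xs.length := by omega
    rw [if_neg hmne, List.range_succ_eq_map, List.map_cons, List.filter_cons]
    have hPm : decide ((c0 :: xs).getD (m + 0 + 1) 0 ≠ (c0 :: xs).getD (m + 0) 0 + 1) = true := by
      simp only [Nat.add_zero, decide_eq_true_eq]
      rw [List.getD_cons_succ, hhead m le_rfl]
      rcases hend with he | he
      · omega
      · exact he
    rw [hPm]
    simp only [if_true]
    congr 1
    rw [List.map_map, List.filter_map]
    have hdropLen : (xs.drop m).length - 1 = L' := by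
      rw [List.length_drop]; omega
    have h2 : ∀ j ∈ List.range L',
        ((fun k => decide ((c0 :: xs).getD (k + 1) 0 ≠ (c0 :: xs).getD k 0 + 1))
            ∘ ((fun j => m + j) ∘ Nat.succ)) j
          = decide ((xs.drop m).getD (j + 1) 0 ≠ (xs.drop m).getD j 0 + 1) := by
      intro j _
      simp only [Function.comp_apply, Nat.succ_eq_add_one]
      have ha : (c0 :: xs).getD (m + (j + 1) + 1) 0 = (xs.drop m).getD (j + 1) 0 := by
        rw [getD_drop, List.getD_cons_succ]
      have hb : (c0 :: xs).getD (m + (j + 1)) 0 = (xs.drop m).getD j 0 := by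
        rw [getD_drop]
        have : m + (j + 1) = (m + j) + 1 := by omega
        rw [this, List.getD_cons_succ]
      simp only [ha, hb]
    rw [List.filter_congr h2, hdropLen]
    exact List.map_congr_left (fun j _ => by simp only [Function.comp_apply]; omega)

-- the last element of the initial maximal run
theorem getD_run_end (c0 : Int) (xs : List Int) (m : Nat)
    (hrun : ∀ i < m, xs.getD i 0 = c0 + i + 1) :
    (c0 :: xs).getD m 0 = c0 + m := by
  cases m with
  | zero => simp
  | succ j => rw [List.getD_cons_succ, hrun j (by omega)]; push_cast; ring

-- the cut list of a list starting with a maximal run is the shifted cut list of the rest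
theorem cutsN_shift (c0 : Int) (xs : List Int) (m : Nat) (hmlt : m < xs.length)
    (hb : breaksN (c0 :: xs) = m :: (breaksN (xs.drop m)).map (· + (m + 1))) :
    cutsN (c0 :: xs) = 0 :: (cutsN (xs.drop m)).map (· + (m + 1)) := by
  unfold cutsN
  rw [hb]
  simp only [List.map_cons, List.map_append, List.map_map, List.length_cons,
    List.length_drop, List.cons_append]
  have e1 : (0 : Nat) + (m + 1) = m + 1 := by omega
  have e2 : xs.length - m + (m + 1) = xs.length + 1 := by omega
  rw [e1, e2]
  congr 2
  congr 1
  exact List.map_congr_left (fun k _ => by simp only [Function.comp_apply]; omega)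

-- labels of the Nat form = bRuns, by strong induction over the run structure
theorem labelsN_eq_bRuns_aux (n : Nat) :
    ∀ cps : List Int, cps.length = n → cps ≠ [] → labelsN cps = bRuns cps := by
  induction n using Nat.strong_induction_on with
  | _ n ih =>
    intro cps hn hne
    obtain ⟨c0, xs, rfl⟩ := List.exists_cons_of_ne_nil hne
    obtain ⟨m, hm, ht, hrun, hend⟩ := bTake_spec c0 xs
    have hb := breaksN_decomp c0 xs m hm hrun hend
    rw [bRuns_cons, ht]
    by_cases hfull : m = xs.length
    · -- the whole list is one run
      rw [if_pos hfull] at hb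
      have hdrop : xs.drop m = [] := by rw [hfull, List.drop_length]
      rw [hdrop, bRuns_nil]
      unfold labelsN cutsN
      rw [hb]
      simp only [List.map_nil, List.nil_append, List.length_cons, List.cons_append,
        List.tail_cons, List.zip_cons_cons, List.zip_nil_right, List.map_cons, List.map_nil]
      have h1 : xs.length + 1 - 1 = m := by omega
      rw [h1, List.getD_cons_zero, getD_run_end c0 xs m hrun]
    · -- the first run, then the rest
      rw [if_neg hfull] at hb
      have hmlt : m < xs.length := by omega
      have hc := cutsN_shift c0 xs m hmlt hb
      have hrne : xs.drop m ≠ [] := by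
        intro hr
        have := congrArg List.length hr
        rw [List.length_drop] at this
        simp at this
        omega
      unfold labelsN
      rw [hc]
      have hM : (cutsN (xs.drop m)).map (· + (m + 1))
          = (0 + (m + 1)) :: ((cutsN (xs.drop m)).tail.map (· + (m + 1))) := rfl
      simp only [List.tail_cons]
      rw [hM, List.zip_cons_cons, List.map_cons, ← hM, List.zip_map, List.map_map]
      congr 1
      · -- head label = fmtR c0 (c0 + m)
        show fmtR ((c0 :: xs).getD 0 0) ((c0 :: xs).getD (0 + (m + 1) - 1) 0) = fmtR c0 (c0 + m)
        have h2 : 0 + (m + 1) - 1 = m := by omega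
        rw [h2, List.getD_cons_zero, getD_run_end c0 xs m hrun]
      · -- shifted tail labels = bRuns of the rest (induction hypothesis)
        have hih : labelsN (xs.drop m) = bRuns (xs.drop m) := by
          have hn' : xs.length + 1 = n := by simpa using hn
          have hlt : (xs.drop m).length < n := by rw [List.length_drop]; omega
          exact ih _ hlt _ rfl hrne
        rw [← hih]
        unfold labelsN
        apply List.map_congr_left
        rintro ⟨s, e⟩ hmem
        have he1 : 1 ≤ e := cutsN_tail_pos (xs.drop m) e (List.of_mem_zip hmem).2 hrne
        simp only [Function.comp_apply, Prod.map]
        have ha : (c0 :: xs).getD (s + (m + 1)) 0 = (xs.drop m).getD s 0 := by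
          have h3 : s + (m + 1) = (m + s) + 1 := by omega
          rw [h3, List.getD_cons_succ, getD_drop]
        have hbb : (c0 :: xs).getD (e + (m + 1) - 1) 0 = (xs.drop m).getD (e - 1) 0 := by
          have h4 : e + (m + 1) - 1 = (m + (e - 1)) + 1 := by omega
          rw [h4, List.getD_cons_succ, getD_drop]
        rw [ha, hbb]

theorem labelsN_eq_bRuns (cps : List Int) (h : cps ≠ []) : labelsN cps = bRuns cps :=
  labelsN_eq_bRuns_aux cps.length cps rfl h

-- ------- A-side: the fold equals bRuns -------
-- A's fold, from state (acc, s, e), over l then the -1 sentinel, appends the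
-- label of the current run (ending at bTake e l) and then bRuns of the rest.
theorem fold_eq_runs (l : List Int) (hl : ∀ x ∈ l, 0 ≤ x) :
    ∀ (s e : Int) (acc : List String), 0 ≤ e →
      ((l ++ [-1]).foldl aStep (acc, s, e)).1
        = acc ++ fmtR s (bTake e l).1 :: bRuns (bTake e l).2 := by
  induction l with
  | nil =>
    intro s e acc he
    have hne : (-1 : Int) ≠ e + 1 := by omega
    simp [aStep, bTake, bRuns_nil, hne]
  | cons y ys ih =>
    intro s e acc he
    have hy : (0 : Int) ≤ y := hl y (by simp)
    have hys : ∀ x ∈ ys, (0 : Int) ≤ x := fun x hx => hl x (by simp [hx])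
    by_cases h : y = e + 1
    · simp only [List.cons_append, List.foldl_cons, aStep, h, if_neg (by omega : ¬ (e + 1 ≠ e + 1))]
      rw [ih hys s (e + 1) acc (by omega)]
      simp [bTake]
    · simp only [List.cons_append, List.foldl_cons, aStep, if_pos h]
      rw [ih hys y y (acc ++ [fmtR s e]) hy]
      simp [bTake, if_neg h, bRuns_cons]

-- ===== VERDICT (by name: the statement is the Claim_ definition above) =====
theorem build_unicode_range_spec : Claim_equal_build_unicode_range := by
  intro chars _ hpre
  unfold Spec_build_unicode_range
  rw [alt_eq_labelsN]
  have hnn : ∀ x ∈ chars.toList.map (fun c => (c.toNat : Int)), (0 : Int) ≤ x := by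
    intro x hx
    simp only [List.mem_map] at hx
    obtain ⟨c, _, rfl⟩ := hx
    exact Int.natCast_nonneg _
  cases hcs : chars.toList.map (fun c => (c.toNat : Int)) with
  | nil =>
    exfalso
    apply hpre
    have h2 : chars.toList = [] := by
      cases h : chars.toList with
      | nil => rfl
      | cons a l => rw [h] at hcs; simp at hcs
    exact String.toList_eq_nil_iff.mp h2
  | cons c0 rest =>
    rw [hcs] at hnn
    have h0 : (0 : Int) ≤ c0 := hnn c0 (by simp)
    have hrest : ∀ x ∈ rest, (0 : Int) ≤ x := fun x hx => hnn x (by simp [hx])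
    rw [labelsN_eq_bRuns _ (by simp)]
    unfold build_unicode_range
    rw [hcs]
    show PySem.Str.join "," ((rest ++ [-1]).foldl aStep ([], c0, c0)).1
      = PySem.Str.join "," (bRuns (c0 :: rest))
    rw [fold_eq_runs rest hrest c0 c0 [] h0, bRuns_cons]
    simp
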